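-- pv_equiv track=rewrite | github.com/iDEALabAcademy/HeatMapLBPNET | CK+/Box/HeatmapGuidedLBPNet/calculate_comparisons.py | auto_generate_spatial_dims
-- ===== SOURCE A (Python) =====
-- import math
--
-- def auto_generate_spatial_dims(initial_size, num_stages, downsample_after):
--     """
--     Automatically generate spatial dimensions based on downsampling.
--
--     Args:
--         initial_size: Tuple (H, W) for initial spatial size
--         num_stages: Total number of stages
--         downsample_after: List of stage indices after which to downsample by 2
--
--     Returns:
--         List of (H, W) tuples for each stage
--     """
--     spatial_dims = []
--     H, W = initial_size
--
--     for stage in range(num_stages):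
--         spatial_dims.append((H, W))
--
--         # Check if we downsample after this stage
--         if downsample_after and stage in downsample_after:
--             H = math.ceil(H / 2)
--             W = math.ceil(W / 2)
--
--     return spatial_dims
-- ===== SOURCE B (Python) =====
-- def auto_generate_spatial_dims(initial_size, num_stages, downsample_after):
--     H0, W0 = initial_size
--     triggers = set(downsample_after)
--     # prefix counts: ks[s] = number of trigger stages among 0..s-1
--     ks = [0]
--     for stage in range(num_stages):
--         ks.append(ks[-1] + (1 if stage in triggers else 0))
--     # x >> k is floor division by 2**k, so -(-x >> k) is exact ceil(x / 2**k)
--     return [(-(-H0 >> k), -(-W0 >> k)) for k in ks[:num_stages]]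
-- ===== Notes on version B (the rewrite author's own statement) =====
-- stated objective: faster
-- what changed: B replaces A's loop mutating (H, W) with float halving and an O(m) list-membership scan per stage by staged passes: a trigger set built once, a prefix-count array of downsamples per stage, then a comprehension dividing the ORIGINAL size by the counted power of two via exact shift-based ceiling division.
import Mathlib
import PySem

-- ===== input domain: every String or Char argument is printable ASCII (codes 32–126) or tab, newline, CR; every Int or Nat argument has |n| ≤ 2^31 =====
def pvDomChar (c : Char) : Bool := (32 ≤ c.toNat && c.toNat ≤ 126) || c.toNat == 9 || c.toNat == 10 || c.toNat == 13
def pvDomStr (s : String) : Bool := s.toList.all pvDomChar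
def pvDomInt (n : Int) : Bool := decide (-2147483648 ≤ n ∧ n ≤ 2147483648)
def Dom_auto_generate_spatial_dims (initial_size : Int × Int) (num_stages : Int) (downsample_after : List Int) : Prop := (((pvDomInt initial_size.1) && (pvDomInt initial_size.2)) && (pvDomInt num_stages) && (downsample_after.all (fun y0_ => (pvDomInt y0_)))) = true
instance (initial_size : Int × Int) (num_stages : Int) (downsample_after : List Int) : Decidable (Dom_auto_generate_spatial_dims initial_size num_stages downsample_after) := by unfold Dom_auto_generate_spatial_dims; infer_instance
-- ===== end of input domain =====

-- B replaces A's loop mutating (H, W) by staged passes: a trigger set, a prefix-count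
-- array of downsamples per stage, then a comprehension dividing the ORIGINAL size by the
-- counted power of two (exact shift-based ceiling division); O(n+m) vs A's O(n*m).


-- ===== PORT A =====
-- math.ceil(H / 2) on an integer H is exact as -((-H) // 2) on the |H| ≤ 2^31 domain
def pvCeilHalf (h : Int) : Int := -(PySem.Int.floordiv (-h) 2)

def auto_generate_spatial_dims (initial_size : Int × Int) (num_stages : Int) (downsample_after : List Int) : List (Int × Int) :=
  ((PySem.List.pyRange 0 num_stages 1).foldl
    (fun st stage =>
      let dims := st.1 ++ [(st.2.1, st.2.2)]
      if !downsample_after.isEmpty && downsample_after.contains stage then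
        (dims, pvCeilHalf st.2.1, pvCeilHalf st.2.2)
      else
        (dims, st.2.1, st.2.2))
    ([], initial_size.1, initial_size.2)).1

-- ===== PORT B =====
-- B's -(-h >> k): a right shift by k is floor division by 2^k, so this is exact ceil(h / 2^k)
def pvShiftCeil (h k : Int) : Int := -(PySem.Int.floordiv (-h) (2 ^ k.toNat))

def auto_generate_spatial_dims_alt (initial_size : Int × Int) (num_stages : Int) (downsample_after : List Int) : List (Int × Int) :=
  let triggers : PySem.Set Int := PySem.Set.ofList downsample_after
  -- ks[-1] via pyGetD: ks starts as [0] and only grows, so the index never raises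
  let ks : List Int := (PySem.List.pyRange 0 num_stages 1).foldl
    (fun ks stage =>
      ks ++ [PySem.List.pyGetD ks (-1) 0 +
             (if PySem.Set.contains triggers stage then 1 else 0)]) [0]
  (PySem.List.slice ks none (some num_stages)).map
    (fun k => (pvShiftCeil initial_size.1 k, pvShiftCeil initial_size.2 k))

-- ===== PRECONDITION & SPEC =====
def Spec_auto_generate_spatial_dims (initial_size : Int × Int) (num_stages : Int) (downsample_after : List Int) (out : List (Int × Int)) : Prop := out = auto_generate_spatial_dims_alt initial_size num_stages downsample_after
instance (initial_size : Int × Int) (num_stages : Int) (downsample_after : List Int) (out : List (Int × Int)) : Decidable (Spec_auto_generate_spatial_dims initial_size num_stages downsample_after out) := by unfold Spec_auto_generate_spatial_dims; infer_instance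

-- ===== CLAIM =====
def Claim_equal_auto_generate_spatial_dims : Prop := ∀ (initial_size : Int × Int) (num_stages : Int) (downsample_after : List Int), Dom_auto_generate_spatial_dims initial_size num_stages downsample_after → Spec_auto_generate_spatial_dims initial_size num_stages downsample_after (auto_generate_spatial_dims initial_size num_stages downsample_after)

-- ===== LEMMAS AND PROOFS =====

-- proof-only: exact integer ceil(h / 2^k), and the count of triggers strictly below a stage
def pvCeilPow (h : Int) (k : Nat) : Int := -(PySem.Int.floordiv (-h) (2 ^ k))

def pvCnt (triggers : List Int) (stage : Int) : Nat :=
  triggers.countP (fun t => decide (0 ≤ t) && decide (t < stage))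

theorem pvCeilPow_zero (h : Int) : pvCeilPow h 0 = h := by
  simp [pvCeilPow, PySem.Int.floordiv]

theorem pvCeilHalf_pvCeilPow (h : Int) (k : Nat) :
    pvCeilHalf (pvCeilPow h k) = pvCeilPow h (k + 1) := by
  simp only [pvCeilHalf, pvCeilPow, neg_neg, neg_inj]
  rw [PySem.Int.floordiv_eq_ediv_of_pos (by positivity),
      PySem.Int.floordiv_eq_ediv_of_pos (by norm_num),
      PySem.Int.floordiv_eq_ediv_of_pos (by positivity),
      Int.ediv_ediv_of_nonneg (by positivity), pow_succ]

theorem pvCnt_zero (S : List Int) : pvCnt S 0 = 0 := by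
  unfold pvCnt
  rw [List.countP_eq_zero]
  intro t _
  simp only [Bool.and_eq_true, decide_eq_true_eq, not_and]
  omega

theorem pvCnt_of_not_mem (S : List Int) (a : Int) (ha : a ∉ S) :
    pvCnt S (a + 1) = pvCnt S a := by
  unfold pvCnt
  apply List.countP_congr
  intro t ht
  have : t ≠ a := fun h => ha (h ▸ ht)
  simp only [Bool.and_eq_true, decide_eq_true_eq]
  constructor <;> (rintro ⟨h1, h2⟩; exact ⟨h1, by omega⟩)

theorem pvCnt_succ (S : List Int) (a : Int) (hS : S.Nodup) (ha : 0 ≤ a) :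
    pvCnt S (a + 1) = pvCnt S a + (if a ∈ S then 1 else 0) := by
  induction S with
  | nil => simp [pvCnt]
  | cons x xs ih =>
      have hnd := List.nodup_cons.mp hS
      simp only [pvCnt, List.countP_cons] at *
      by_cases hx : x = a
      · subst hx
        have h3 := pvCnt_of_not_mem xs x hnd.1
        simp only [pvCnt] at h3
        have hp' : (decide (0 ≤ x) && decide (x < x + 1)) = true := by
          simp only [Bool.and_eq_true, decide_eq_true_eq]; omega
        have hp : (decide (0 ≤ x) && decide (x < x)) = false := by
          simp only [Bool.and_eq_false_iff, decide_eq_false_iff_not]; omega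
        have hm : x ∈ x :: xs := List.mem_cons_self
        rw [h3, hp', hp, if_pos hm]
        simp
      · have hlt : (decide (0 ≤ x) && decide (x < a + 1)) = (decide (0 ≤ x) && decide (x < a)) := by
          by_cases h0 : 0 ≤ x
          · simp only [h0, decide_true, Bool.true_and]
            have : x < a + 1 ↔ x < a := by omega
            simp [this]
          · simp [h0]
        have hmem : (if a ∈ x :: xs then (1 : Nat) else 0) = (if a ∈ xs then 1 else 0) := by
          have hax : ¬ a = x := fun h => hx h.symm
          simp only [List.mem_cons, hax, false_or]
        rw [ih hnd.2, hlt, hmem]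
        omega

-- A's trigger test equals plain list membership (contains implies nonempty)
theorem pv_trigger_eq (da : List Int) (x : Int) :
    (!da.isEmpty && da.contains x) = da.contains x := by
  cases da <;> simp

-- loop invariant: A's fold over range(a, b) from the size at count (pvCnt S a) produces B's map
theorem pv_fold_map (H W : Int) (da : List Int) (b : Int) :
    ∀ (n : Nat) (a : Int) (acc : List (Int × Int)), 0 ≤ a → (b - a).toNat = n →
    ((PySem.List.pyRange a b 1).foldl
      (fun st stage =>
        let dims := st.1 ++ [(st.2.1, st.2.2)]
        if !da.isEmpty && da.contains stage then
          (dims, pvCeilHalf st.2.1, pvCeilHalf st.2.2)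
        else
          (dims, st.2.1, st.2.2))
      (acc, pvCeilPow H (pvCnt (PySem.Set.ofList da) a),
            pvCeilPow W (pvCnt (PySem.Set.ofList da) a))).1 =
    acc ++ (PySem.List.pyRange a b 1).map (fun stage =>
      (pvCeilPow H (pvCnt (PySem.Set.ofList da) stage),
       pvCeilPow W (pvCnt (PySem.Set.ofList da) stage))) := by
  intro n
  induction n with
  | zero =>
      intro a acc _ hn
      rw [PySem.List.pyRange_one_eq_nil (by omega)]
      simp
  | succ m ih =>
      intro a acc ha hn
      by_cases hab : a < b
      · rw [PySem.List.pyRange_one_cons hab]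
        simp only [List.foldl_cons, List.map_cons]
        set S := PySem.Set.ofList da with hSdef
        have hstep : pvCnt S (a + 1) = pvCnt S a + (if a ∈ S then 1 else 0) :=
          pvCnt_succ S a (PySem.Set.nodup_ofList da) ha
        by_cases htr : da.contains a = true
        · have hmemS : a ∈ S := (PySem.Set.mem_ofList da a).mpr (by simpa using htr)
          have hcnt : pvCnt S (a + 1) = pvCnt S a + 1 := by rw [hstep]; simp [hmemS]
          rw [pv_trigger_eq]
          simp only [htr, if_pos, pvCeilHalf_pvCeilPow, ← hcnt]
          rw [ih (a + 1) _ (by omega) (by omega)]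
          simp
        · have hmemS : a ∉ S := fun h => htr (by simpa using (PySem.Set.mem_ofList da a).mp h)
          have hcnt : pvCnt S (a + 1) = pvCnt S a := by rw [hstep]; simp [hmemS]
          rw [pv_trigger_eq]
          simp only [htr, if_neg, Bool.not_eq_true, ← hcnt]
          rw [ih (a + 1) _ (by omega) (by omega)]
          simp
      · rw [PySem.List.pyRange_one_eq_nil (by omega)]
        simp

theorem pvShiftCeil_natCast (h : Int) (k : Nat) : pvShiftCeil h (k : Int) = pvCeilPow h k := by
  simp [pvShiftCeil, pvCeilPow]

theorem pv_ite_contains (da : List Int) (a : Int) :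
    (if PySem.Set.contains (PySem.Set.ofList da) a then (1 : Int) else 0) =
    (if a ∈ PySem.Set.ofList da then 1 else 0) := by
  by_cases h : a ∈ PySem.Set.ofList da
  · rw [if_pos h, if_pos ((PySem.Set.contains_iff _ _).mpr h)]
  · rw [if_neg h, if_neg (fun hc => h ((PySem.Set.contains_iff _ _).mp hc))]

-- B's prefix-count pass produces exactly the per-stage trigger counts
theorem pv_ks_spec (da : List Int) : ∀ n : Nat,
    (PySem.List.pyRange 0 (n : Int) 1).foldl
      (fun ks stage =>
        ks ++ [PySem.List.pyGetD ks (-1) 0 +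
               (if PySem.Set.contains (PySem.Set.ofList da) stage then 1 else 0)]) [0] =
    (List.range (n + 1)).map (fun s : Nat => (pvCnt (PySem.Set.ofList da) (s : Int) : Int)) := by
  intro n
  induction n with
  | zero =>
      rw [show ((0 : Nat) : Int) = 0 from rfl, PySem.List.pyRange_one_eq_nil le_rfl]
      simp [List.range_one, pvCnt_zero]
  | succ n ih =>
      have h1 : ((n + 1 : Nat) : Int) = (n : Int) + 1 := by push_cast; ring
      rw [h1, PySem.List.pyRange_one_succ_right (Int.natCast_nonneg n), List.foldl_append, ih]
      simp only [List.foldl_cons, List.foldl_nil]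
      have hlast : PySem.List.pyGetD
          ((List.range (n + 1)).map (fun s : Nat => (pvCnt (PySem.Set.ofList da) (s : Int) : Int)))
          (-1) 0 = (pvCnt (PySem.Set.ofList da) (n : Int) : Int) := by
        rw [List.range_succ, List.map_append, List.map_singleton,
            PySem.List.pyGetD_neg_one_append_singleton]
      rw [hlast]
      conv_rhs => rw [List.range_succ (n := n + 1), List.map_append]
      congr 1
      simp only [List.map_singleton]
      congr 1
      have hstep := pvCnt_succ (PySem.Set.ofList da) (n : Int)
        (PySem.Set.nodup_ofList da) (Int.natCast_nonneg n)
      rw [pv_ite_contains]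
      have h2 : ((n + 1 : Nat) : Int) = (n : Int) + 1 := by push_cast; ring
      rw [h2, hstep]
      by_cases hm : (n : Int) ∈ PySem.Set.ofList da <;> simp [hm]

-- ===== VERDICT =====
theorem auto_generate_spatial_dims_spec : Claim_equal_auto_generate_spatial_dims := by
  intro initial_size num_stages downsample_after _
  unfold Spec_auto_generate_spatial_dims auto_generate_spatial_dims auto_generate_spatial_dims_alt
  dsimp only
  by_cases hn : 0 ≤ num_stages
  · obtain ⟨n, rfl⟩ : ∃ n : Nat, (n : Int) = num_stages := ⟨num_stages.toNat, Int.toNat_of_nonneg hn⟩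
    have hA := pv_fold_map initial_size.1 initial_size.2 downsample_after (n : Int)
      ((n : Int) - 0).toNat 0 [] le_rfl rfl
    rw [pvCnt_zero, pvCeilPow_zero, pvCeilPow_zero] at hA
    rw [hA, List.nil_append]
    rw [pv_ks_spec downsample_after n, PySem.List.slice_to_natCast, ← List.map_take,
        List.take_range]
    have hmin : min n (n + 1) = n := by omega
    rw [hmin, List.map_map, PySem.List.pyRange_zero_natCast, List.map_map]
    refine List.map_congr_left (fun s _ => ?_)
    simp [Function.comp, pvShiftCeil_natCast]
  · rw [PySem.List.pyRange_one_eq_nil (by omega)]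
    simp only [List.foldl_nil]
    have : PySem.List.slice [(0 : Int)] none (some num_stages) = [] := by
      obtain ⟨k, hk, rfl⟩ : ∃ k : Nat, 0 < k ∧ -(k : Int) = num_stages :=
        ⟨(-num_stages).toNat, by omega, by omega⟩
      rw [PySem.List.slice_to_neg_natCast _ k hk]
      have h10 : 1 - k = 0 := by omega
      simp [h10]
    rw [this, List.map_nil]
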